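-- pv_equiv track=rewrite | github.com/BondarenkoCom/AIJobSearcher | scripts/inbox_analytics.py | _sent_maps
-- ===== SOURCE A (Python) =====
-- from typing import Dict, List, Optional, Set, Tuple
--
-- def _normalize_email(value: str) -> str:
--     return (value or "").strip().lower()
--
-- def _sent_maps(sent_rows: List[Dict[str, str]]) -> Tuple[Dict[str, Dict[str, str]], Set[str]]:
--     by_recipient: Dict[str, Dict[str, str]] = {}
--     recipients: Set[str] = set()
--     for row in sent_rows:
--         to_email = _normalize_email(row.get("to_email", ""))
--         if not to_email:
--             continue
--         recipients.add(to_email)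
--         prev = by_recipient.get(to_email)
--         if not prev or (row.get("timestamp") or "") > (prev.get("timestamp") or ""):
--             by_recipient[to_email] = row
--     return by_recipient, recipients
-- ===== SOURCE B (Python) =====
-- def _normalize_email(value: str) -> str:
--     return (value or "").strip().lower()
--
-- def _sent_maps(sent_rows):
--     # staged pipeline: key the rows, collect recipient order, then reduce per recipient
--     keyed = [(e, row) for row in sent_rows
--              for e in [_normalize_email(row.get("to_email", ""))] if e]
--     order = list(dict.fromkeys(e for e, _ in keyed))
--     by_recipient = {
--         e: max((row for e2, row in keyed if e2 == e),
--                key=lambda r: r.get("timestamp") or "")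
--         for e in order
--     }
--     return by_recipient, set(order)
-- ===== Notes on version B (the rewrite author's own statement) =====
-- stated objective: alternative
-- what changed: Replaces A's single online loop with a running per-recipient max kept in a dict by a staged pipeline: key and filter the rows once, dedup the recipient keys to fix the order, then for each recipient reduce its rows with max(key=timestamp) by rescanning the keyed list.
import Mathlib
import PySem

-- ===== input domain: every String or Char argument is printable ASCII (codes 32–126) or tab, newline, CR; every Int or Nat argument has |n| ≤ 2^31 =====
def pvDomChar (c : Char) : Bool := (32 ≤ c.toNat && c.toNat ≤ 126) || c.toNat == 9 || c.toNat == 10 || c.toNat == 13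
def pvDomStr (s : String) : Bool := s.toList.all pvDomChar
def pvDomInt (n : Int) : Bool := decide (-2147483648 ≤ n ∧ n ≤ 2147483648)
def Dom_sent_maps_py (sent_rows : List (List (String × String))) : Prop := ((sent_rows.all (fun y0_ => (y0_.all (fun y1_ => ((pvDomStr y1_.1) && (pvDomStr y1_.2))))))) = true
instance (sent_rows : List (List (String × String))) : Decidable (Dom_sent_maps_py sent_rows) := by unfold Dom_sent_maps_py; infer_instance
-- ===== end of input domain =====

-- B replaces A's online running-max dict loop by a staged pipeline (key+filter the rows,
-- dedup the recipients, then reduce each recipient's rows with max by timestamp): alternative.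

-- _normalize_email (same-module helper of both Pythons)
def pvNormEmail (value : String) : String := PySem.Str.lower (PySem.Str.strip value)

-- row.get("timestamp") or ""  (shared by A's comparison and B's max key)
def pvTs (r : List (String × String)) : String := (PySem.Dict.mk r).getD "timestamp" ""

-- ===== PORT A =====
-- loop body of A: running max per recipient, overwrite only on strictly larger timestamp
def pvStepA (st : PySem.Dict String (List (String × String)) × PySem.Set String)
    (row : List (String × String)) :
    PySem.Dict String (List (String × String)) × PySem.Set String :=
  let to_email := pvNormEmail ((PySem.Dict.mk row).getD "to_email" "")
  if to_email = "" then st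
  else
    let recipients := PySem.Set.add st.2 to_email
    match st.1.get? to_email with
    | none => (st.1.insert to_email row, recipients)
    | some prev =>
      -- 'not prev or …': a dict is falsy iff empty
      if prev = [] ∨ pvTs prev < pvTs row
      then (st.1.insert to_email row, recipients)
      else (st.1, recipients)

def sent_maps_py (sent_rows : List (List (String × String))) :
    (List (String × List (String × String))) × List String :=
  let st := sent_rows.foldl pvStepA (PySem.Dict.empty, PySem.Set.empty)
  (st.1.items, st.2)

-- ===== PORT B =====
-- '(e, row) for row in sent_rows for e in [_normalize_email(row.get("to_email",""))] if e'
def pvKey (row : List (String × String)) : Option (String × List (String × String)) :=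
  let e := pvNormEmail ((PySem.Dict.mk row).getD "to_email" "")
  if e = "" then none else some (e, row)

-- 'max((row for e2, row in keyed if e2 == e), key=lambda r: r.get("timestamp") or "")'
def pvBest (e : String) (keyed : List (String × List (String × String))) :
    List (String × String) :=
  (PySem.List.max? ((keyed.filter (fun p => p.1 == e)).map Prod.snd) pvTs).getD []

def sent_maps_py_alt (sent_rows : List (List (String × String))) :
    (List (String × List (String × String))) × List String :=
  let keyed := sent_rows.filterMap pvKey
  let order := PySem.List.dedup (keyed.map Prod.fst)
  (order.map (fun e => (e, pvBest e keyed)), PySem.Set.ofList order)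

-- ===== PRECONDITION & SPEC =====
def Spec_sent_maps_py (sent_rows : List (List (String × String))) (out : (List (String × List (String × String))) × List String) : Prop := out = sent_maps_py_alt sent_rows
instance (sent_rows : List (List (String × String))) (out : (List (String × List (String × String))) × List String) : Decidable (Spec_sent_maps_py sent_rows out) := by unfold Spec_sent_maps_py; infer_instance

-- ===== CLAIM (what is proved, stated in full; the proofs are below) =====
def Claim_equal_sent_maps_py : Prop := ∀ (sent_rows : List (List (String × String))), Dom_sent_maps_py sent_rows → Spec_sent_maps_py sent_rows (sent_maps_py sent_rows)

-- ===== LEMMAS AND PROOFS =====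

-- abbreviations for the proofs
def pvKeyed (xs : List (List (String × String))) : List (String × List (String × String)) :=
  xs.filterMap pvKey

def pvOrd (xs : List (List (String × String))) : List String :=
  PySem.List.dedup ((pvKeyed xs).map Prod.fst)

-- lookup in a dict whose items are 'ord.map (fun e => (e, f e))'
lemma pv_find_map (ord : List String) (f : String → List (String × String)) (e : String) :
    ((ord.map (fun k => (k, f k))).find? (fun p => p.1 == e)).map (fun x => x.2)
      = if e ∈ ord then some (f e) else none := by
  induction ord with
  | nil => simp
  | cons k t ih =>
    by_cases hk : k = e
    · subst hk; simp
    · rw [List.map_cons, List.find?_cons_of_neg (by simp [hk]), ih]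
      simp [Ne.symm hk]

lemma pv_get?_items_map (d : PySem.Dict String (List (String × String)))
    (ord : List String) (f : String → List (String × String))
    (h : d.items = ord.map (fun e => (e, f e))) (e : String) :
    d.get? e = if e ∈ ord then some (f e) else none := by
  simp only [PySem.Dict.get?, h]
  exact pv_find_map ord f e

lemma pv_max?_append_some (rows : List (List (String × String))) (row m : List (String × String))
    (h : PySem.List.max? rows pvTs = some m) :
    PySem.List.max? (rows ++ [row]) pvTs = if pvTs m < pvTs row then some row else some m := by
  unfold PySem.List.max? at h ⊢
  rw [List.foldl_append, h]
  rfl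

-- a row that survives pvKey is a nonempty assoc list
lemma pv_keyed_snd_ne_nil (xs : List (List (String × String)))
    (p : String × List (String × String)) (hp : p ∈ pvKeyed xs) : p.2 ≠ [] := by
  obtain ⟨row, _, hk⟩ := List.mem_filterMap.mp hp
  simp only [pvKey] at hk
  by_cases he : pvNormEmail ((PySem.Dict.mk row).getD "to_email" "") = ""
  · simp [he] at hk
  · rw [if_neg he] at hk
    rw [← Option.some.inj hk]
    intro hnil
    simp only at hnil
    subst hnil
    exact he (by decide)

lemma pv_dedup_append (l : List String) (e : String) :
    PySem.List.dedup (l ++ [e]) = PySem.Set.add (PySem.List.dedup l) e := by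
  simp only [PySem.List.dedup_eq_ofList, PySem.Set.ofList_eq_foldl, List.foldl_append,
    List.foldl_cons, List.foldl_nil]

-- the invariant: A's fold state is B's pipeline result
lemma pv_foldA (xs : List (List (String × String))) :
    (xs.foldl pvStepA (PySem.Dict.empty, PySem.Set.empty)).1.items
        = (pvOrd xs).map (fun e => (e, pvBest e (pvKeyed xs)))
      ∧ (xs.foldl pvStepA (PySem.Dict.empty, PySem.Set.empty)).2 = pvOrd xs := by
  induction xs using List.reverseRecOn with
  | nil => exact ⟨rfl, rfl⟩
  | append_singleton t row ih =>
    obtain ⟨ih1, ih2⟩ := ih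
    rw [List.foldl_append, List.foldl_cons, List.foldl_nil]
    set st := t.foldl pvStepA (PySem.Dict.empty, PySem.Set.empty) with hst
    by_cases he : pvNormEmail ((PySem.Dict.mk row).getD "to_email" "") = ""
    · -- skipped row: nothing changes
      have hk : pvKeyed (t ++ [row]) = pvKeyed t := by
        simp [pvKeyed, List.filterMap_append, pvKey, he]
      have hordeq : pvOrd (t ++ [row]) = pvOrd t := by
        rw [pvOrd, hk]; rfl
      have hstep : pvStepA st row = st := by
        unfold pvStepA; simp [he]
      rw [hstep, hk, hordeq]
      exact ⟨ih1, ih2⟩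
    · set e := pvNormEmail ((PySem.Dict.mk row).getD "to_email" "") with hedef
      have hk : pvKeyed (t ++ [row]) = pvKeyed t ++ [(e, row)] := by
        simp [pvKeyed, List.filterMap_append, pvKey, ← hedef, he]
      have hord : pvOrd (t ++ [row]) = PySem.Set.add (pvOrd t) e := by
        rw [pvOrd, hk, List.map_append, List.map_cons, List.map_nil, pv_dedup_append]
        rfl
      have hget := pv_get?_items_map st.1 (pvOrd t) _ ih1 e
      by_cases hmem : e ∈ pvOrd t
      · -- recipient already seen: A compares timestamps
        have hnotmemfst : e ∈ (pvKeyed t).map Prod.fst := by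
          have := (PySem.List.mem_dedup (xs := (pvKeyed t).map Prod.fst) (x := e)).mp hmem
          exact this
        -- the group of e is nonempty, so the max exists and is one of e's rows
        have hfilter_ne : ((pvKeyed t).filter (fun p => p.1 == e)).map Prod.snd ≠ [] := by
          obtain ⟨p, hp, hpe⟩ := List.mem_map.mp hnotmemfst
          intro hnil
          have : p ∈ (pvKeyed t).filter (fun p => p.1 == e) :=
            List.mem_filter.mpr ⟨hp, by simp [hpe]⟩
          rw [List.map_eq_nil_iff.mp hnil] at this
          exact List.not_mem_nil this
        obtain ⟨m, hm⟩ : ∃ m, PySem.List.max? (((pvKeyed t).filter (fun p => p.1 == e)).map Prod.snd) pvTs = some m := by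
          cases hmx : PySem.List.max? (((pvKeyed t).filter (fun p => p.1 == e)).map Prod.snd) pvTs with
          | none => exact absurd ((PySem.List.max?_eq_none_iff _ _).mp hmx) hfilter_ne
          | some m => exact ⟨m, rfl⟩
        have hbest : pvBest e (pvKeyed t) = m := by rw [pvBest, hm]; rfl
        have hmne : m ≠ [] := by
          have hmem' := PySem.List.max?_mem hm
          obtain ⟨p, hp, hpm⟩ := List.mem_map.mp hmem'
          have := pv_keyed_snd_ne_nil t p (List.mem_filter.mp hp).1
          exact hpm ▸ this
        have hcontains : st.1.contains e = true := by
          rw [PySem.Dict.contains_eq_isSome_get?, hget, if_pos hmem]; rfl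
        have hOrdEq : pvOrd (t ++ [row]) = pvOrd t := by
          rw [hord, PySem.Set.add_of_mem hmem]
        -- new best for e' ≠ e is unchanged
        have hbest_ne : ∀ e', e' ≠ e → pvBest e' (pvKeyed (t ++ [row])) = pvBest e' (pvKeyed t) := by
          intro e' hne
          rw [pvBest, pvBest, hk, List.filter_append]
          have : ((e, row).1 == e') = false := by simp [Ne.symm hne]
          simp [this]
        -- new best for e is decided by the timestamp comparison
        have hbest_e : pvBest e (pvKeyed (t ++ [row]))
            = if pvTs m < pvTs row then row else m := by
          rw [pvBest, hk, List.filter_append]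
          simp only [List.filter_cons, List.filter_nil]
          have : ((e, row).1 == e) = true := by simp
          rw [if_pos this, List.map_append, List.map_cons, List.map_nil,
            pv_max?_append_some _ row m hm]
          split_ifs <;> rfl
        unfold pvStepA
        simp only [← hedef, if_neg he, hget, if_pos hmem]
        by_cases hlt : pvTs (pvBest e (pvKeyed t)) < pvTs row
        · rw [if_pos (Or.inr hlt)]
          refine ⟨?_, by simp only [ih2, ← hord]⟩
          show (st.1.insert e row).items = _
          rw [PySem.Dict.items_insert_of_contains st.1 row hcontains, ih1, hOrdEq,
            List.map_map]
          apply List.map_congr_left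
          intro e' _
          by_cases hee : e' = e
          · subst hee
            simp only [Function.comp, beq_self_eq_true, if_pos]
            rw [hbest_e, if_pos (hbest ▸ hlt)]
          · have : (e' == e) = false := by simp [hee]
            simp [Function.comp, this, hbest_ne e' hee]
        · have hcond : ¬(pvBest e (pvKeyed t) = [] ∨ pvTs (pvBest e (pvKeyed t)) < pvTs row) := by
            rintro (h1 | h2)
            · exact hmne (hbest ▸ h1)
            · exact hlt h2
          rw [if_neg hcond]
          refine ⟨?_, by simp only [ih2, ← hord]⟩
          rw [ih1, hOrdEq]
          apply List.map_congr_left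
          intro e' _
          by_cases hee : e' = e
          · subst hee
            rw [hbest_e, if_neg (by rw [← hbest]; exact hlt), hbest]
          · rw [hbest_ne e' hee]
      · -- first occurrence of recipient e: A inserts
        have hnone : st.1.get? e = none := by rw [hget, if_neg hmem]
        have hcontains : st.1.contains e = false := by
          rw [PySem.Dict.contains_eq_isSome_get?, hnone]; rfl
        have hnotfst : e ∉ (pvKeyed t).map Prod.fst := by
          intro hin
          exact hmem ((PySem.List.mem_dedup (xs := (pvKeyed t).map Prod.fst) (x := e)).mpr hin)
        have hOrdEq : pvOrd (t ++ [row]) = pvOrd t ++ [e] := by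
          rw [hord, PySem.Set.add_of_not_mem hmem]
        have hfilter_nil : (pvKeyed t).filter (fun p => p.1 == e) = [] := by
          rw [List.filter_eq_nil_iff]
          intro p hp
          simp only [beq_iff_eq]
          intro hpe
          exact hnotfst (List.mem_map.mpr ⟨p, hp, hpe⟩)
        have hbest_ne : ∀ e', e' ≠ e → pvBest e' (pvKeyed (t ++ [row])) = pvBest e' (pvKeyed t) := by
          intro e' hne
          rw [pvBest, pvBest, hk, List.filter_append]
          have : ((e, row).1 == e') = false := by simp [Ne.symm hne]
          simp [this]
        have hbest_e : pvBest e (pvKeyed (t ++ [row])) = row := by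
          rw [pvBest, hk, List.filter_append, hfilter_nil]
          simp only [List.nil_append, List.filter_cons, List.filter_nil]
          have : ((e, row).1 == e) = true := by simp
          rw [if_pos this]
          rfl
        unfold pvStepA
        simp only [← hedef, if_neg he, hnone]
        refine ⟨?_, by simp only [ih2, ← hord]⟩
        show (st.1.insert e row).items = _
        rw [PySem.Dict.items_insert_of_not_contains st.1 row hcontains, ih1, hOrdEq,
          List.map_append]
        congr 1
        · apply List.map_congr_left
          intro e' he'
          have hne : e' ≠ e := fun h => hmem (h ▸ he')
          rw [hbest_ne e' hne]
        · simp [hbest_e]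

-- ===== VERDICT (by name: the statement is the Claim_ definition above) =====
theorem sent_maps_py_spec : Claim_equal_sent_maps_py := by
  intro xs _
  unfold Spec_sent_maps_py
  obtain ⟨h1, h2⟩ := pv_foldA xs
  have hB : sent_maps_py_alt xs =
      ((pvOrd xs).map (fun e => (e, pvBest e (pvKeyed xs))),
       PySem.Set.ofList (pvOrd xs)) := rfl
  have hnd : (pvOrd xs).Nodup := PySem.List.nodup_dedup _
  rw [show sent_maps_py xs = ((xs.foldl pvStepA (PySem.Dict.empty, PySem.Set.empty)).1.items,
      (xs.foldl pvStepA (PySem.Dict.empty, PySem.Set.empty)).2) from rfl,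
    hB, h1, h2, PySem.Set.ofList_eq_self_of_nodup _ hnd]
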